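-- pv_equiv track=rewrite | github.com/nicobenz/teaching-tools | scripts/crawl_data.py | _get_toc
-- ===== SOURCE A (Python) =====
-- def _get_toc(content: dict) -> dict[int, str]:
--     toc = {}
--     for key, value in content.items():
--         if value["section"] not in toc:
--             toc[value["section"]] = {key: value["title"]}
--         else:
--             toc[value["section"]][key] = value["title"]
--     return toc
-- ===== SOURCE B (Python) =====
-- def _get_toc(content: dict) -> dict[int, str]:
--     sections = dict.fromkeys(value["section"] for value in content.values())
--     return {
--         section: {key: value["title"]
--                   for key, value in content.items()
--                   if value["section"] == section}
--         for section in sections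
--     }
-- ===== Notes on version B (the rewrite author's own statement) =====
-- stated objective: alternative
-- what changed: Replaces A's single-pass membership-tested nested-dict accumulation with a two-phase group-by: first collect the distinct sections in order of first appearance (dict.fromkeys), then build each section's inner dict with one filtered comprehension per section.
import Mathlib
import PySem

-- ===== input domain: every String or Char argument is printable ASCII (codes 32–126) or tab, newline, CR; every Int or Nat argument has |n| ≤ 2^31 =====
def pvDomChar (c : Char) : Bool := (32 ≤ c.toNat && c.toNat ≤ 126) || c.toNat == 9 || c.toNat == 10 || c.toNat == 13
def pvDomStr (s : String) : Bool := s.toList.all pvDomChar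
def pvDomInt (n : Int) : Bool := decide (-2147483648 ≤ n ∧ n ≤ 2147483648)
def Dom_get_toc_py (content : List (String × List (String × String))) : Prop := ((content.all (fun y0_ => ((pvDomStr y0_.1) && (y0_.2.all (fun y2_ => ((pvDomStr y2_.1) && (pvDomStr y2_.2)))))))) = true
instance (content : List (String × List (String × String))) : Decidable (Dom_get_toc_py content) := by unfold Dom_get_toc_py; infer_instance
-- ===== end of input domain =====

-- B groups content by section with dict.fromkeys + one filtered comprehension per section instead of A's
-- incremental membership-tested nested-dict accumulation; equivalence of the return values is proved below.

-- ===== PORT A =====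
-- value[k] for the inner dicts; Pre_ guarantees the key is present (Python raises KeyError otherwise)
def pvVal (v : List (String × String)) (k : String) : String := (PySem.Dict.mk v).getD k ""

-- one iteration of A's loop body
def pvStepA (toc : PySem.Dict String (PySem.Dict String String))
    (kv : String × List (String × String)) : PySem.Dict String (PySem.Dict String String) :=
  if toc.contains (pvVal kv.2 "section") = false then
    toc.insert (pvVal kv.2 "section") (PySem.Dict.mk [(kv.1, pvVal kv.2 "title")])
  else
    toc.modify (pvVal kv.2 "section") PySem.Dict.empty (fun inner => inner.insert kv.1 (pvVal kv.2 "title"))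

def get_toc_py (content : List (String × List (String × String))) : List (String × List (String × String)) :=
  ((content.foldl pvStepA PySem.Dict.empty).items).map (fun p => (p.1, p.2.items))

-- ===== PORT B =====
-- the inner dict comprehension {key: value["title"] for key, value in content.items() if value["section"] == s}
def pvInnerB (content : List (String × List (String × String))) (s : String) : PySem.Dict String String :=
  (content.filter (fun kv => pvVal kv.2 "section" == s)).foldl
    (fun d kv => d.insert kv.1 (pvVal kv.2 "title")) PySem.Dict.empty

def get_toc_py_alt (content : List (String × List (String × String))) : List (String × List (String × String)) :=
  (PySem.List.dedup (content.map (fun kv => pvVal kv.2 "section"))).map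
    (fun s => (s, (pvInnerB content s).items))

-- ===== PRECONDITION & SPEC =====
-- Pre_ excludes exactly the inputs on which Python A raises KeyError: a value dict missing "section" or "title".
def Pre_get_toc_py (content : List (String × List (String × String))) : Prop :=
  ∀ kv ∈ content, (PySem.Dict.mk kv.2).contains "section" = true ∧ (PySem.Dict.mk kv.2).contains "title" = true
instance (content : List (String × List (String × String))) : Decidable (Pre_get_toc_py content) := by unfold Pre_get_toc_py; infer_instance

def pvWitness_get_toc_py : (List (String × List (String × String))) :=
  [("k1", [("section", "B"), ("title", "t1")]), ("k2", [("section", "A"), ("title", "t2")])]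

def Spec_get_toc_py (content : List (String × List (String × String))) (out : List (String × List (String × String))) : Prop := out = get_toc_py_alt content
instance (content : List (String × List (String × String))) (out : List (String × List (String × String))) : Decidable (Spec_get_toc_py content out) := by unfold Spec_get_toc_py; infer_instance

-- ===== CLAIM (what is proved, stated in full; the proofs are below) =====
def Claim_equal_get_toc_py : Prop := ∀ (content : List (String × List (String × String))), Dom_get_toc_py content → Pre_get_toc_py content → Spec_get_toc_py content (get_toc_py content)

-- ===== LEMMAS AND PROOFS =====

-- shorthand used only by the proofs
def pvSec (kv : String × List (String × String)) : String := pvVal kv.2 "section"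

lemma pvFilter_nil_of_not_mem (ys : List (String × List (String × String))) (s : String)
    (h : s ∉ ys.map pvSec) : ys.filter (fun kv => pvVal kv.2 "section" == s) = [] := by
  rw [List.filter_eq_nil_iff]
  intro kv hkv he
  exact h (List.mem_map.mpr ⟨kv, hkv, eq_of_beq he⟩)

lemma pvInnerB_append (ys : List (String × List (String × String)))
    (kv : String × List (String × String)) (s : String) :
    pvInnerB (ys ++ [kv]) s =
      if pvSec kv = s then (pvInnerB ys s).insert kv.1 (pvVal kv.2 "title")
      else pvInnerB ys s := by
  unfold pvInnerB pvSec
  rw [List.filter_append, List.foldl_append]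
  by_cases h : pvVal kv.2 "section" = s
  · simp only [List.filter_cons, List.filter_nil, h, beq_self_eq_true, if_true]
    rfl
  · simp only [List.filter_cons, List.filter_nil, if_neg h]
    rw [beq_eq_false_iff_ne.mpr h]
    rfl

-- the central invariant: A's accumulated dict-of-dicts, as an items list, is B's group-by result
lemma pvMain (xs : List (String × List (String × String))) :
    (xs.foldl pvStepA PySem.Dict.empty).items =
      (PySem.Set.ofList (xs.map pvSec)).map (fun s => (s, pvInnerB xs s)) := by
  induction xs using List.reverseRecOn with
  | nil => rfl
  | append_singleton ys kv ih =>
    have hkeys : (ys.foldl pvStepA PySem.Dict.empty).keys = PySem.Set.ofList (ys.map pvSec) := by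
      show ((ys.foldl pvStepA PySem.Dict.empty).items).map Prod.fst = _
      rw [ih, List.map_map]
      simp [Function.comp_def]
    have hnd : (PySem.Set.ofList (ys.map pvSec)).Nodup := PySem.Set.nodup_ofList _
    have hcont : (ys.foldl pvStepA PySem.Dict.empty).contains (pvVal kv.2 "section")
        = decide (pvSec kv ∈ PySem.Set.ofList (ys.map pvSec)) := by
      rw [PySem.Dict.contains_eq_decide_mem_keys, hkeys]; rfl
    rw [List.foldl_append, List.foldl_cons, List.foldl_nil]
    rw [List.map_append, List.map_cons, List.map_nil, PySem.Set.ofList_append_singleton]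
    by_cases hmem : pvSec kv ∈ PySem.Set.ofList (ys.map pvSec)
    · -- section already present: A modifies the inner dict, B's section list is unchanged
      have hget : (ys.foldl pvStepA PySem.Dict.empty).getD (pvVal kv.2 "section") PySem.Dict.empty
          = pvInnerB ys (pvSec kv) := by
        apply PySem.Dict.getD_of_mem_items
        · rw [ih]
          exact List.mem_map.mpr ⟨pvSec kv, hmem, rfl⟩
        · rw [hkeys]; exact hnd
      rw [PySem.Set.add_of_mem hmem]
      rw [pvStepA, hcont, if_neg (by simp [hmem])]
      rw [PySem.Dict.modify.eq_1, hget,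
          PySem.Dict.items_insert_of_contains _ _ (by rw [hcont]; simp [hmem]), ih, List.map_map]
      apply List.map_congr_left
      intro s hs
      rw [pvInnerB_append]
      by_cases he : pvSec kv = s
      · simp [Function.comp_apply, ← he, pvSec]
      · have hb : (s == pvVal kv.2 "section") = false := by
          simp only [beq_eq_false_iff_ne]
          intro h
          exact he (show pvSec kv = s from h.symm)
        simp only [Function.comp_apply, hb, Bool.false_eq_true, if_false]
        rw [if_neg he]
    · -- new section: A appends a fresh singleton inner dict, B appends the section
      have hinner : pvInnerB (ys ++ [kv]) (pvSec kv) = PySem.Dict.mk [(kv.1, pvVal kv.2 "title")] := by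
        rw [pvInnerB_append, if_pos rfl]
        unfold pvInnerB
        rw [pvFilter_nil_of_not_mem ys (pvSec kv) (by simpa [PySem.Set.mem_ofList] using hmem)]
        rfl
      rw [PySem.Set.add_of_not_mem hmem]
      rw [pvStepA, hcont, if_pos (decide_eq_false hmem)]
      rw [PySem.Dict.items_insert_of_not_contains _ _ (by rw [hcont]; simp [hmem]), ih,
          List.map_append, List.map_cons, List.map_nil]
      congr 1
      · apply List.map_congr_left
        intro s hs
        rw [pvInnerB_append, if_neg (fun (he : pvSec kv = s) => hmem (he.symm ▸ hs))]
      · rw [hinner]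
        rfl

theorem get_toc_py_spec : Claim_equal_get_toc_py := by
  intro content _ _
  unfold Spec_get_toc_py get_toc_py get_toc_py_alt
  rw [pvMain, List.map_map, PySem.List.dedup_eq_ofList]
  rfl
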